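-- pv_equiv track=rewrite | github.com/miliar/Code_Jam_Webscraper | solutions_python/Problem_201/1453.py | getDepthAndRemaining
-- ===== SOURCE A (Python) =====
-- def getDepthAndRemaining(k):
--     i = 0
--     while k > 0:
--         lastI = i
--         lastK = k
--         k -= 2**i
--         i += 1
--     return (lastK,lastI)
-- ===== SOURCE B (Python) =====
-- def getDepthAndRemaining(k):
--     i = k.bit_length() - 1
--     return (k - 2**i + 1, i)
-- ===== Notes on version B (the rewrite author's own statement) =====
-- stated objective: simpler
-- what changed: Replaced the cumulative power-of-two subtraction loop with a closed form: depth i = k.bit_length()-1 and remainder k - 2**i + 1.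
import Mathlib
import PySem

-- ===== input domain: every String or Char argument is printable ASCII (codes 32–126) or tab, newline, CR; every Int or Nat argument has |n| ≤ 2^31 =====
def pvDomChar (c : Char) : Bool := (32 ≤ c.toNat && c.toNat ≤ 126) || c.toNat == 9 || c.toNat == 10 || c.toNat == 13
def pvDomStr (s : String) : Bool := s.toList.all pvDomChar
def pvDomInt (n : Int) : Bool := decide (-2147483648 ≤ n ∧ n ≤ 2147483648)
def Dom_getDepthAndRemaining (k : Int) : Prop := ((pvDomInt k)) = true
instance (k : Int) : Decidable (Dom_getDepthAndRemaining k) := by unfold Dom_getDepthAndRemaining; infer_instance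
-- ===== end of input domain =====

-- B replaces A's cumulative power-of-two subtraction loop by a bit_length closed form (simpler).
-- Pre_ excludes k ≤ 0, where A raises UnboundLocalError (lastK/lastI never assigned).


-- ===== PORT A =====
-- loop state: (k, i, lastK, lastI); Python's lastK/lastI are unassigned before the first
-- iteration (UnboundLocalError on k ≤ 0, excluded by Pre_), so the initial (0,0) is never returned inside Pre_.
def getDepthAndRemainingLoop (k : Int) (i : Nat) (lastK lastI : Int) : Int × Int :=
  if 0 < k then getDepthAndRemainingLoop (k - 2 ^ i) (i + 1) k (i : Int) else (lastK, lastI)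
termination_by k.toNat
decreasing_by
  have h1 : (1 : Int) ≤ 2 ^ i := one_le_pow₀ (by norm_num)
  omega

def getDepthAndRemaining (k : Int) : Int × Int :=
  getDepthAndRemainingLoop k 0 0 0

-- ===== PORT B =====
-- Python int.bit_length: 0 for 0, otherwise ⌊log2 |n|⌋ + 1 (exact for every int)
def pyBitLength (n : Int) : Int :=
  if n = 0 then 0 else (Nat.log 2 n.natAbs + 1 : Nat)

def getDepthAndRemaining_alt (k : Int) : Int × Int :=
  let i : Int := pyBitLength k - 1
  (k - 2 ^ i.toNat + 1, i)

-- ===== PRECONDITION & SPEC =====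
-- Pre_ excludes exactly k ≤ 0, where A raises UnboundLocalError (the loop never assigns lastK/lastI).
def Pre_getDepthAndRemaining (k : Int) : Prop := 1 ≤ k
instance (k : Int) : Decidable (Pre_getDepthAndRemaining k) := by unfold Pre_getDepthAndRemaining; infer_instance
def pvWitness_getDepthAndRemaining : Int := (5)

def Spec_getDepthAndRemaining (k : Int) (out : Int × Int) : Prop := out = getDepthAndRemaining_alt k
instance (k : Int) (out : Int × Int) : Decidable (Spec_getDepthAndRemaining k out) := by unfold Spec_getDepthAndRemaining; infer_instance

-- ===== CLAIM (what is proved, stated in full; the proofs are below) =====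
def Claim_equal_getDepthAndRemaining : Prop := ∀ (k : Int), Dom_getDepthAndRemaining k → Pre_getDepthAndRemaining k → Spec_getDepthAndRemaining k (getDepthAndRemaining k)

-- ===== LEMMAS AND PROOFS =====

-- loop invariant: at state (k, i), k equals the original K minus (2^i - 1); the loop
-- stops exactly when i reaches ⌊log2 K⌋, returning (K - 2^⌊log2 K⌋ + 1, ⌊log2 K⌋).
lemma getDepthAndRemainingLoop_inv (K : Int) :
    ∀ (m i : Nat) (lK lI : Int), Nat.log 2 K.toNat + 1 - i = m → 0 < K - (2 ^ i - 1) →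
      getDepthAndRemainingLoop (K - (2 ^ i - 1)) i lK lI
        = (K - 2 ^ (Nat.log 2 K.toNat) + 1, (Nat.log 2 K.toNat : Int)) := by
  intro m
  induction m using Nat.strong_induction_on with
  | _ m ih =>
    intro i lK lI hm hpos
    have hKpos : 0 < K := by
      have h1 : (1 : Int) ≤ 2 ^ i := one_le_pow₀ (by norm_num)
      omega
    have hpowK : (2 : Int) ^ i ≤ K := by omega
    have hpowKn : 2 ^ i ≤ K.toNat := by
      have : ((2 : Int) ^ i) = ((2 ^ i : Nat) : Int) := by push_cast; ring
      omega
    have hiL : i ≤ Nat.log 2 K.toNat :=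
      (Nat.le_log_iff_pow_le (by norm_num) (by omega)).mpr hpowKn
    rw [getDepthAndRemainingLoop, if_pos hpos]
    have hstep : K - (2 ^ i - 1) - 2 ^ i = K - (2 ^ (i + 1) - 1) := by ring_nf
    rw [hstep]
    by_cases hnext : 0 < K - (2 ^ (i + 1) - 1)
    · exact ih (Nat.log 2 K.toNat + 1 - (i + 1)) (by omega) (i + 1) _ _ rfl hnext
    · rw [getDepthAndRemainingLoop, if_neg hnext]
      have hlt : K.toNat < 2 ^ (i + 1) := by
        have : ((2 : Int) ^ (i + 1)) = ((2 ^ (i + 1) : Nat) : Int) := by push_cast; ring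
        omega
      have hL : Nat.log 2 K.toNat = i := Nat.log_eq_of_pow_le_of_lt_pow hpowKn hlt
      rw [hL]
      simp only [Prod.mk.injEq]
      exact ⟨by omega, trivial⟩

theorem getDepthAndRemaining_spec : Claim_equal_getDepthAndRemaining := by
  intro k _ hk
  unfold Spec_getDepthAndRemaining getDepthAndRemaining getDepthAndRemaining_alt pyBitLength
  have hk0 : k ≠ 0 := by unfold Pre_getDepthAndRemaining at hk; omega
  have hk1 : (1 : Int) ≤ k := hk
  rw [if_neg hk0]
  have habs : k.natAbs = k.toNat := by omega
  have hIdx : (((Nat.log 2 k.natAbs + 1 : Nat) : Int) - 1).toNat = Nat.log 2 k.toNat := by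
    rw [habs]; omega
  have h0 : k - (2 ^ 0 - 1) = k := by ring
  have := getDepthAndRemainingLoop_inv k (Nat.log 2 k.toNat + 1) 0 0 0 (by omega) (by omega)
  rw [h0] at this
  rw [this]
  simp only [habs]
  have e1 : ((Nat.log 2 k.toNat + 1 : Nat) : Int) - 1 = (Nat.log 2 k.toNat : Int) := by
    push_cast; ring
  rw [e1, Int.toNat_natCast]
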